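-- pv_equiv track=rewrite | github.com/CVxTz/handwriting_forensics | code/handwriting_online_gru.py | generate_sample_from_strokes
-- ===== SOURCE A (Python) =====
-- def cap(seq, cap_val=0, max_size=40):
--     seq = seq[:max_size]
--     seq = seq + [cap_val] * (max_size - len(seq))
--     return seq
--
-- def to_delta(x):
--     x = [0] + x
--     deltas = [b - a for a, b in zip(x[:-1], x[1:])]
--     return deltas
--
-- def generate_sample_from_strokes(data, size_max=1000, pen_val=10):
--     x = []
--     y = []
--     pen = []
--     for stroke in data['strokes']:
--         x += stroke['x']
--         y += stroke['y']
--         _pen = [0] * len(stroke['x'])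
--         _pen[0] = pen_val
--         pen += _pen
--
--     pen = cap(pen, cap_val=0, max_size=size_max)
--     x = cap(x, cap_val=0, max_size=size_max)
--     y = cap(y, cap_val=0, max_size=size_max)
--
--     x = to_delta(x)
--     y = to_delta(y)
--
--     return list(zip(x, y, pen))
-- ===== SOURCE B (Python) =====
-- def generate_sample_from_strokes(data, size_max=1000, pen_val=10):
--     xs, ys, starts = [], [], set()
--     for stroke in data['strokes']:
--         if stroke['x']:
--             starts.add(len(xs))
--         xs += stroke['x']
--         ys += stroke['y']
--
--     def val(seq, i):
--         return seq[i] if 0 <= i < len(seq) else 0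
--
--     return [(val(xs, i) - val(xs, i - 1),
--              val(ys, i) - val(ys, i - 1),
--              pen_val if i in starts else 0)
--             for i in range(size_max)]
-- ===== Notes on version B (the rewrite author's own statement) =====
-- stated objective: alternative
-- what changed: B replaces A's cap/pad, prepend-0-delta-zip pipeline over three materialised lists by a per-index closed form: one comprehension over range(size_max) computing each tuple directly from the concatenated x/y streams and a set of stroke-start offsets; Pre_ excludes negative size_max (a negative size cap is outside the natural domain; A's truncating value there is an accident of slice semantics) and inputs where A raises (missing keys, empty stroke x).
-- outside the precondition, e.g. on generate_sample_from_strokes({'strokes': [{'x': [1, 4], 'y': [2, 2]}]}, -1, 10): A returns [(1, 2, 10)], B returns []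
import Mathlib
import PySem

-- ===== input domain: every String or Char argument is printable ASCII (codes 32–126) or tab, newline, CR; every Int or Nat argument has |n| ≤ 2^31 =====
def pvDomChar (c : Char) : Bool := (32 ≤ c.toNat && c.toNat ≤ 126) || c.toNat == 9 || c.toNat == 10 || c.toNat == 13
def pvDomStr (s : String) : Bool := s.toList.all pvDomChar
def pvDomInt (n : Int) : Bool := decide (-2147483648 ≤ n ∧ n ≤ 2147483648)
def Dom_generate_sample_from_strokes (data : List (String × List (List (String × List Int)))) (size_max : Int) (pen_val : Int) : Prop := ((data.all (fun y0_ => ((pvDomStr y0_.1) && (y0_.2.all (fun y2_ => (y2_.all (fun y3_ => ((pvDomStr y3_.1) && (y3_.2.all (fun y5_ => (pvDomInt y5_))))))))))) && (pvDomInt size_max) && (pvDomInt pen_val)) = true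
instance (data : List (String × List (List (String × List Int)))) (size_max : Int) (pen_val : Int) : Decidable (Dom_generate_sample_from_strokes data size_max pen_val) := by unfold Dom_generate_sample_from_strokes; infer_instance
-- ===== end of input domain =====

-- B replaces A's cap/delta/zip list pipeline by a per-index closed form over the concatenated streams (alternative decomposition, same cost).


-- ===== PORT A =====
-- cap(seq, cap_val, max_size): seq[:max_size] padded with cap_val up to max_size
def pyCap (seq : List Int) (cap_val : Int) (max_size : Int) : List Int :=
  let s := PySem.List.slice seq none (some max_size)
  s ++ List.replicate (max_size - (s.length : Int)).toNat cap_val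

-- to_delta(x): x = [0] + x; [b - a for a, b in zip(x[:-1], x[1:])]
def pyToDelta (x : List Int) : List Int :=
  let x' := (0 : Int) :: x
  ((PySem.List.slice x' none (some (-1))).zip (PySem.List.slice x' (some 1) none)).map
    (fun p => p.2 - p.1)

-- loop body of A: x += stroke['x']; y += stroke['y']; _pen = [0]*len; _pen[0] = pen_val; pen += _pen
-- (list.set is a no-op on the empty list where Python raises IndexError; Pre_ excludes that)
def pyAccum (pen_val : Int) (st : List Int × List Int × List Int) (stroke : List (String × List Int)) :
    List Int × List Int × List Int :=
  let sx := (PySem.Dict.get? (PySem.Dict.mk stroke) "x").getD []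
  let sy := (PySem.Dict.get? (PySem.Dict.mk stroke) "y").getD []
  let _pen := (List.replicate sx.length (0 : Int)).set 0 pen_val
  (st.1 ++ sx, st.2.1 ++ sy, st.2.2 ++ _pen)

def generate_sample_from_strokes (data : List (String × List (List (String × List Int)))) (size_max : Int) (pen_val : Int) : List (Int × Int × Int) :=
  let strokes := (PySem.Dict.get? (PySem.Dict.mk data) "strokes").getD []   -- KeyError excluded by Pre_
  let st := strokes.foldl (pyAccum pen_val) ([], [], [])
  let pen := pyCap st.2.2 0 size_max
  let x := pyCap st.1 0 size_max
  let y := pyCap st.2.1 0 size_max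
  let dx := pyToDelta x
  let dy := pyToDelta y
  dx.zip (dy.zip pen)

-- ===== PORT B =====
-- val(seq, i) = seq[i] if 0 <= i < len(seq) else 0
def pvVal (seq : List Int) (i : Int) : Int :=
  if 0 ≤ i ∧ i < (seq.length : Int) then (PySem.List.pyGet? seq i).getD 0 else 0

-- loop body of B: record the offset of each nonempty stroke, extend xs/ys
def pvAccum (st : List Int × List Int × PySem.Set Int) (stroke : List (String × List Int)) :
    List Int × List Int × PySem.Set Int :=
  let sx := (PySem.Dict.get? (PySem.Dict.mk stroke) "x").getD []
  let sy := (PySem.Dict.get? (PySem.Dict.mk stroke) "y").getD []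
  let starts := if sx ≠ [] then PySem.Set.add st.2.2 (st.1.length : Int) else st.2.2
  (st.1 ++ sx, st.2.1 ++ sy, starts)

def generate_sample_from_strokes_alt (data : List (String × List (List (String × List Int)))) (size_max : Int) (pen_val : Int) : List (Int × Int × Int) :=
  let strokes := (PySem.Dict.get? (PySem.Dict.mk data) "strokes").getD []
  let st := strokes.foldl pvAccum ([], [], PySem.Set.empty)
  (PySem.List.pyRange 0 size_max 1).map (fun i =>
    (pvVal st.1 i - pvVal st.1 (i - 1),
     pvVal st.2.1 i - pvVal st.2.1 (i - 1),
     if PySem.Set.contains st.2.2 i then pen_val else 0))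

-- ===== PRECONDITION & SPEC =====
-- Pre_ excludes the inputs where A raises — a missing 'strokes' key (KeyError), a stroke missing
-- 'x' or 'y' (KeyError), a stroke with empty 'x' (IndexError on _pen[0]) — and negative size_max:
-- a negative size cap is outside the task's natural domain, and A's truncating value there is an
-- accident of Python slice semantics that a natural closed-form B does not reproduce.
def Pre_generate_sample_from_strokes (data : List (String × List (List (String × List Int)))) (size_max : Int) (pen_val : Int) : Prop :=
  0 ≤ size_max ∧
  (PySem.Dict.get? (PySem.Dict.mk data) "strokes").isSome = true ∧
  ∀ stroke ∈ (PySem.Dict.get? (PySem.Dict.mk data) "strokes").getD [],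
    (PySem.Dict.get? (PySem.Dict.mk stroke) "x").isSome = true ∧
    (PySem.Dict.get? (PySem.Dict.mk stroke) "y").isSome = true ∧
    (PySem.Dict.get? (PySem.Dict.mk stroke) "x").getD [] ≠ []
instance (data : List (String × List (List (String × List Int)))) (size_max : Int) (pen_val : Int) : Decidable (Pre_generate_sample_from_strokes data size_max pen_val) := by unfold Pre_generate_sample_from_strokes; infer_instance

def pvWitness_generate_sample_from_strokes : (List (String × List (List (String × List Int)))) × Int × Int :=
  ([("strokes", [[("x", [1, 4]), ("y", [2, 2])], [("x", [7]), ("y", [5])]])], 5, 10)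

def Spec_generate_sample_from_strokes (data : List (String × List (List (String × List Int)))) (size_max : Int) (pen_val : Int) (out : List (Int × Int × Int)) : Prop := out = generate_sample_from_strokes_alt data size_max pen_val
instance (data : List (String × List (List (String × List Int)))) (size_max : Int) (pen_val : Int) (out : List (Int × Int × Int)) : Decidable (Spec_generate_sample_from_strokes data size_max pen_val out) := by unfold Spec_generate_sample_from_strokes; infer_instance

-- ===== CLAIM (what is proved, stated in full; the proofs are below) =====
def Claim_equal_generate_sample_from_strokes : Prop := ∀ (data : List (String × List (List (String × List Int)))) (size_max : Int) (pen_val : Int), Dom_generate_sample_from_strokes data size_max pen_val → Pre_generate_sample_from_strokes data size_max pen_val → Spec_generate_sample_from_strokes data size_max pen_val (generate_sample_from_strokes data size_max pen_val)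

-- ===== LEMMAS AND PROOFS =====

theorem length_pyCap (seq : List Int) (c m : Int) (hm : 0 ≤ m) :
    ((pyCap seq c m).length : Int) = m := by
  simp [pyCap, PySem.List.slice_to _ hm]
  omega

theorem getElem_pyCap (seq : List Int) (c m : Int) (hm : 0 ≤ m) (i : Nat) (h : i < (pyCap seq c m).length) :
    (pyCap seq c m)[i] = seq.getD i c := by
  by_cases hi : i < (PySem.List.slice seq none (some m)).length
  · simp only [pyCap] ; rw [List.getElem_append_left hi]
    have hlt : i < seq.length := by
      have := hi; rw [PySem.List.slice_to seq hm] at this; simp at this; omega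
    simp only [PySem.List.slice_to seq hm] at hi ⊢
    simp [List.getD_eq_getElem?_getD, List.getElem?_eq_getElem hlt, List.getElem_take]
  · simp only [pyCap]; rw [List.getElem_append_right (by omega)]
    simp only [List.getElem_replicate]
    have hlen : seq.length ≤ i := by
      have hL := length_pyCap seq c m hm
      rw [PySem.List.slice_to seq hm] at hi
      simp at hi
      omega
    simp [List.getD_eq_getElem?_getD, List.getElem?_eq_none hlen]

theorem length_pyToDelta (x : List Int) : (pyToDelta x).length = x.length := by
  simp [pyToDelta, PySem.List.slice_to_neg_one, PySem.List.slice_from_one]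

theorem getElem_pyToDelta (x : List Int) (i : Nat) (h : i < (pyToDelta x).length) :
    (pyToDelta x)[i] = x.getD i 0 - (if i = 0 then 0 else x.getD (i - 1) 0) := by
  have hx : i < x.length := by rw [← length_pyToDelta x]; exact h
  simp only [pyToDelta, PySem.List.slice_to_neg_one, PySem.List.slice_from_one, List.tail_cons,
    List.getElem_map, List.getElem_zip]
  rw [List.getElem_dropLast]
  rcases i with _ | j
  · simp [List.getD_eq_getElem?_getD, List.getElem?_eq_getElem hx]
  · simp [List.getD_eq_getElem?_getD, List.getElem?_eq_getElem hx,
      List.getElem?_eq_getElem (by omega : j < x.length), List.getElem_cons_succ]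

theorem pvVal_natCast (X : List Int) (i : Nat) : pvVal X (i : Int) = X.getD i 0 := by
  by_cases h : i < X.length
  · simp [pvVal, h, List.getD_eq_getElem?_getD]
  · simp [pvVal, h, List.getD_eq_getElem?_getD]

theorem pvVal_pred (X : List Int) (i : Nat) :
    pvVal X ((i : Int) - 1) = if i = 0 then 0 else X.getD (i - 1) 0 := by
  rcases i with _ | j
  · simp [pvVal]
  · have h : ((j + 1 : Nat) : Int) - 1 = (j : Int) := by push_cast; ring
    rw [h, pvVal_natCast]
    simp

theorem getD_pyCap (seq : List Int) (m : Int) (hm : 0 ≤ m) (i : Nat) (h : i < (pyCap seq 0 m).length) :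
    (pyCap seq 0 m).getD i 0 = seq.getD i 0 := by
  rw [List.getD_eq_getElem?_getD, List.getElem?_eq_getElem h, Option.getD_some, getElem_pyCap seq 0 m hm]

-- the two accumulation loops, run from related states, stay related
theorem accum_rel (pen_val : Int) (strokes : List (List (String × List Int)))
    (x y p : List Int) (s : PySem.Set Int)
    (hstk : ∀ st ∈ strokes, (PySem.Dict.get? (PySem.Dict.mk st) "x").getD [] ≠ [])
    (h1 : p.length = x.length)
    (h2 : ∀ i : Nat, i < x.length → p.getD i 0 = if (i : Int) ∈ s then pen_val else 0)
    (h3 : ∀ j ∈ s, 0 ≤ j ∧ j < (x.length : Int)) :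
    (strokes.foldl (pyAccum pen_val) (x, y, p)).1 = (strokes.foldl pvAccum (x, y, s)).1 ∧
    (strokes.foldl (pyAccum pen_val) (x, y, p)).2.1 = (strokes.foldl pvAccum (x, y, s)).2.1 ∧
    (strokes.foldl (pyAccum pen_val) (x, y, p)).2.2.length = (strokes.foldl (pyAccum pen_val) (x, y, p)).1.length ∧
    (∀ i : Nat, i < (strokes.foldl (pyAccum pen_val) (x, y, p)).1.length →
      (strokes.foldl (pyAccum pen_val) (x, y, p)).2.2.getD i 0 =
        if (i : Int) ∈ (strokes.foldl pvAccum (x, y, s)).2.2 then pen_val else 0) ∧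
    (∀ j ∈ (strokes.foldl pvAccum (x, y, s)).2.2, 0 ≤ j ∧ j < ((strokes.foldl (pyAccum pen_val) (x, y, p)).1.length : Int)) := by
  induction strokes generalizing x y p s with
  | nil => exact ⟨rfl, rfl, h1, h2, h3⟩
  | cons st rest ih =>
    simp only [List.foldl_cons]
    have hsx : (PySem.Dict.get? (PySem.Dict.mk st) "x").getD [] ≠ [] := hstk st (by simp)
    set sx := (PySem.Dict.get? (PySem.Dict.mk st) "x").getD [] with hsxdef
    have hslen : 0 < sx.length := by
      cases hcase : sx with
      | nil => exact absurd hcase hsx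
      | cons a l => simp
    have hAcc : pyAccum pen_val (x, y, p) st =
        (x ++ sx, y ++ (PySem.Dict.get? (PySem.Dict.mk st) "y").getD [],
         p ++ (List.replicate sx.length (0:Int)).set 0 pen_val) := rfl
    have hBcc : pvAccum (x, y, s) st =
        (x ++ sx, y ++ (PySem.Dict.get? (PySem.Dict.mk st) "y").getD [],
         PySem.Set.add s (x.length : Int)) := by
      simp only [pvAccum, ← hsxdef, if_pos hsx]
    simp only [hAcc, hBcc]
    have hpen : (List.replicate sx.length (0:Int)).set 0 pen_val
        = pen_val :: List.replicate (sx.length - 1) (0:Int) := by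
      cases hcase : sx with
      | nil => exact absurd hcase hsx
      | cons a l => simp [List.replicate_succ]
    apply ih
    · intro st' hst'; exact hstk st' (by simp [hst'])
    · simp [hpen, h1]; omega
    · intro i hi
      simp only [List.length_append] at hi
      by_cases hil : i < x.length
      · rw [List.getD_append _ _ _ _ (by omega : i < p.length)]
        rw [h2 i hil]
        have : ((i : Int) ∈ PySem.Set.add s (x.length : Int)) ↔ (i : Int) ∈ s := by
          rw [PySem.Set.mem_add]
          constructor
          · rintro (h | h)
            · exact h
            · exfalso; omega
          · exact Or.inl
        rw [if_congr this rfl rfl]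
      · rw [List.getD_append_right _ _ _ _ (by omega : p.length ≤ i)]
        rw [hpen, h1]
        by_cases hieq : i = x.length
        · subst hieq
          simp [PySem.Set.mem_add]
        · have h1' : 1 ≤ i - x.length := by omega
          obtain ⟨j, hj⟩ := Nat.exists_eq_add_of_le h1'
          rw [hj]
          have hz : (pen_val :: List.replicate (sx.length - 1) (0:Int)).getD (1 + j) 0 = 0 := by
            rw [(by omega : 1 + j = j + 1), List.getD_cons_succ]
            simp [List.getD_eq_getElem?_getD, List.getElem?_replicate]
            split <;> simp
          rw [hz, if_neg]
          rw [PySem.Set.mem_add]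
          rintro (hmem | hmem)
          · have := (h3 _ hmem).2; omega
          · omega
    · intro j hj
      rw [PySem.Set.mem_add] at hj
      simp only [List.length_append]
      rcases hj with hj | hj
      · have := h3 j hj; omega
      · subst hj; push_cast; omega

-- assembling the pipeline equals the per-index closed form
theorem assemble (X Y P : List Int) (s : PySem.Set Int) (m pv : Int) (hm : 0 ≤ m)
    (h1 : P.length = X.length)
    (h2 : ∀ i : Nat, i < X.length → P.getD i 0 = if (i : Int) ∈ s then pv else 0)
    (h3 : ∀ j ∈ s, 0 ≤ j ∧ j < (X.length : Int)) :
    (pyToDelta (pyCap X 0 m)).zip ((pyToDelta (pyCap Y 0 m)).zip (pyCap P 0 m)) =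
    (PySem.List.pyRange 0 m 1).map
      (fun i => (pvVal X i - pvVal X (i - 1), pvVal Y i - pvVal Y (i - 1),
                 if PySem.Set.contains s i then pv else 0)) := by
  have hlX := length_pyCap X 0 m hm
  have hlY := length_pyCap Y 0 m hm
  have hlP := length_pyCap P 0 m hm
  have hlen : ((pyToDelta (pyCap X 0 m)).zip ((pyToDelta (pyCap Y 0 m)).zip (pyCap P 0 m))).length
      = ((PySem.List.pyRange 0 m 1).map
      (fun i => (pvVal X i - pvVal X (i - 1), pvVal Y i - pvVal Y (i - 1),
                 if PySem.Set.contains s i then pv else 0))).length := by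
    simp [List.length_zip, length_pyToDelta, PySem.List.pyRange_one]
    omega
  apply List.ext_getElem hlen
  intro i hiL hiR
  have hiX : i < (pyCap X 0 m).length := by
    simp [List.length_zip, length_pyToDelta] at hiL; omega
  have hiY : i < (pyCap Y 0 m).length := by
    simp [List.length_zip, length_pyToDelta] at hiL; omega
  have hiP : i < (pyCap P 0 m).length := by
    simp [List.length_zip, length_pyToDelta] at hiL; omega
  have hidx : (PySem.List.pyRange 0 m 1)[i]'(by simpa using hiR) = (i : Int) := by
    simp [PySem.List.pyRange_one]
  rw [List.getElem_map, hidx]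
  rw [List.getElem_zip, List.getElem_zip]
  have hdx : (pyToDelta (pyCap X 0 m))[i]'(by rw [length_pyToDelta]; exact hiX)
      = pvVal X i - pvVal X ((i:Int) - 1) := by
    rw [getElem_pyToDelta, getD_pyCap X m hm i hiX, pvVal_natCast, pvVal_pred]
    rcases Nat.eq_zero_or_pos i with h0 | h0
    · simp [h0]
    · rw [if_neg (by omega), if_neg (by omega), getD_pyCap X m hm (i-1) (by omega)]
  have hdy : (pyToDelta (pyCap Y 0 m))[i]'(by rw [length_pyToDelta]; exact hiY)
      = pvVal Y i - pvVal Y ((i:Int) - 1) := by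
    rw [getElem_pyToDelta, getD_pyCap Y m hm i hiY, pvVal_natCast, pvVal_pred]
    rcases Nat.eq_zero_or_pos i with h0 | h0
    · simp [h0]
    · rw [if_neg (by omega), if_neg (by omega), getD_pyCap Y m hm (i-1) (by omega)]
  have hpen : (pyCap P 0 m)[i]'hiP = if PySem.Set.contains s (i : Int) then pv else 0 := by
    rw [getElem_pyCap P 0 m hm]
    by_cases hil : i < X.length
    · rw [h2 i hil]
      by_cases hmem : (i : Int) ∈ s <;> simp [hmem, PySem.Set.contains]
    · have hnm : (i : Int) ∉ s := fun hc => by have := (h3 _ hc).2; omega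
      rw [List.getD_eq_getElem?_getD, List.getElem?_eq_none (by omega : P.length ≤ i)]
      simp [PySem.Set.contains, hnm]
  simp only [hdx, hdy, hpen]

-- ===== VERDICT (by name: the statement is the Claim_ definition above) =====
theorem generate_sample_from_strokes_spec : Claim_equal_generate_sample_from_strokes := by
  intro data size_max pen_val _hdom hpre
  unfold Spec_generate_sample_from_strokes
  obtain ⟨hm, -, hstk⟩ := hpre
  have hrel := accum_rel pen_val ((PySem.Dict.get? (PySem.Dict.mk data) "strokes").getD []) [] [] [] PySem.Set.empty
    (fun st hst => (hstk st hst).2.2)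
    (by simp) (by simp) (by simp [PySem.Set.empty])
  obtain ⟨hx, hy, hlen, hP, hs⟩ := hrel
  simp only [generate_sample_from_strokes, generate_sample_from_strokes_alt]
  rw [← hx, ← hy]
  exact assemble _ _ _ _ size_max pen_val hm hlen hP hs
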